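-- pv_equiv track=rewrite | github.com/KashishGoel24/COL215---Digital-Logic-and-System-Design | Assignment 3/2021CS50602_2021CS50595_assignment_3.py | next_possible_mintermsforexpansion
-- ===== SOURCE A (Python) =====
-- import copy
--
-- def nonecount(a):
--     #INPUT --> Any term corresponding to n variables.
--     #OUTPUT --> The number of 'None' in the term i.e. number of variables from which the term is independent.
--     nonecount = 0
--     for i in range(len(a)):
--         if a[i] == None:
--             nonecount += 1
--     return nonecount
--
-- def generate_minterm(term):
--     #OUTPUT --> For every term, return list of all the possible minterms which can be added to it by converting 'None' to 1 and 0
--     #Generates minterms which when expanded give us term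
--     if (nonecount(term)==0):
--         return [term]
--     else:
--         i = 0
--         while (i < len(term)):
--             if (term[i] != None):
--                 i += 1
--             else:
--                 break
--             #i= index of first None
--         reducedterm1=copy.deepcopy(term)
--         reducedterm2=copy.deepcopy(term)
--         reducedterm1[i]=0
--         reducedterm2[i]=1
--         list1=generate_minterm(reducedterm1)
--         list2=generate_minterm(reducedterm2)
--         return list1+list2
--
-- def next_possible_mintermsforexpansion(term):
--     #OUTPUT--> For every term, returns all the possible minterms with which the term can be combined and the region can be expanded
--     #gives us the set of minterms that can be possibly used for the next expansion for a given term by tryying to remove exactly one bit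
--     list=[]
--     for i in range(len(term)):
--         if(term[i]==0 or  term[i]==1):
--             newterm=copy.deepcopy(term)
--             newterm[i]= int(not newterm[i])
--             list.append((i, generate_minterm(newterm)))  #appending the minterm along with the literal which has been changed to otin the terms of possible expansion
--         else:
--             pass
--     return list
-- ===== SOURCE B (Python) =====
-- def _expansions(term):
--     # iterative back-to-front expansion: each None doubles the suffix list (0-branch first)
--     suffixes = [[]]
--     for v in reversed(term):
--         if v is None:
--             suffixes = [[0] + s for s in suffixes] + [[1] + s for s in suffixes]
--         else:
--             suffixes = [[v] + s for s in suffixes]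
--     return suffixes
--
-- def next_possible_mintermsforexpansion(term):
--     return [(i, _expansions(term[:i] + [1 - v] + term[i+1:]))
--             for i, v in enumerate(term) if v == 0 or v == 1]
-- ===== Notes on version B (the rewrite author's own statement) =====
-- stated objective: alternative
-- what changed: Replaces the first-None recursion with repeated deepcopies (and an O(n) nonecount scan per recursive call) by a single iterative back-to-front expansion that doubles a suffix list at each None, and the outer range/deepcopy loop by an enumerate comprehension with slicing.
import Mathlib
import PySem

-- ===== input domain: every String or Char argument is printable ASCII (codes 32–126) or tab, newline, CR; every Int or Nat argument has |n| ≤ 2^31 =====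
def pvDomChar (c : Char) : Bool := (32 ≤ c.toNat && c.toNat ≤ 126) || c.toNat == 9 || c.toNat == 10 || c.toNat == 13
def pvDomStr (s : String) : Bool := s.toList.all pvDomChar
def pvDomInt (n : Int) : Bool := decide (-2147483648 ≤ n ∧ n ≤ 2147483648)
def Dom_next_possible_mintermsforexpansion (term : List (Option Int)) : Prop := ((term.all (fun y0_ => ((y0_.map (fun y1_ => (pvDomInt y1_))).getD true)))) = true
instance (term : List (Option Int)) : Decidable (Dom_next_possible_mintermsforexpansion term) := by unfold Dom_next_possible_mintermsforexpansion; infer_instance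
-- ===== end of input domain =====

-- B replaces A's first-None recursion (deepcopies, nonecount rescans) with one iterative
-- back-to-front expansion doubling a suffix list at each None, and the outer range loop by an
-- enumerate comprehension. Neither program mutates its argument (A deepcopies before writing).

-- ===== PORT A =====

-- nonecount(a): loop over range(len(a)); a[i] with i ∈ range(len(a)) is always in range, so getD is exact
def pyNonecount (a : List (Option Int)) : Int :=
  (List.range a.length).foldl (fun nc i => if a.getD i none = none then nc + 1 else nc) 0

-- the 'while i < len(term): if term[i] != None: i += 1 else: break' loop of generate_minterm
def pyFirstNone (term : List (Option Int)) (i : Nat) : Nat :=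
  if h : i < term.length then
    if term.getD i none ≠ none then pyFirstNone term (i + 1) else i
  else i
termination_by term.length - i
decreasing_by omega

-- termination helpers for generate_minterm (the port cites gen_decr in decreasing_by)
theorem pyNonecount_foldl (a : List (Option Int)) :
    ∀ (c : Int), (List.range a.length).foldl (fun nc i => if a.getD i none = none then nc + 1 else nc) c
      = c + (a.countP (fun x => x.isNone) : Int) := by
  induction a using List.reverseRecOn with
  | nil => simp
  | append_singleton l x ih =>
    intro c
    have hlen : (l ++ [x]).length = l.length + 1 := by simp
    rw [hlen, List.range_succ, List.foldl_append]
    have hfold : (List.range l.length).foldl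
        (fun nc i => if (l ++ [x]).getD i none = none then nc + 1 else nc) c
        = (List.range l.length).foldl (fun nc i => if l.getD i none = none then nc + 1 else nc) c := by
      apply List.foldl_ext
      intro acc i hi
      simp only [List.mem_range] at hi
      rw [List.getD_append _ _ _ i hi]
    rw [hfold, ih c]
    have hx : (l ++ [x]).getD l.length none = x := by
      rw [List.getD_eq_getElem _ _ (by simp)]
      simp
    simp only [List.foldl_cons, List.foldl_nil, hx, List.countP_append, List.countP_cons,
      List.countP_nil]
    cases x <;> simp <;> ring

theorem pyNonecount_eq_countP (a : List (Option Int)) :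
    pyNonecount a = (a.countP (fun x => x.isNone) : Int) := by
  simpa using pyNonecount_foldl a 0

theorem pyFirstNone_spec (t : List (Option Int)) : ∀ (i : Nat), none ∈ t.drop i →
    pyFirstNone t i < t.length ∧ t.getD (pyFirstNone t i) none = none ∧
      (∀ j, i ≤ j → j < pyFirstNone t i → t.getD j none ≠ none) := by
  intro i
  fun_induction pyFirstNone t i with
  | case1 i h hne ih =>
    intro hmem
    have hdrop : t[i] :: t.drop (i + 1) = t.drop i := List.getElem_cons_drop h
    have hge : t[i] ≠ none := by rwa [List.getD_eq_getElem _ _ h] at hne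
    have hmem' : none ∈ t.drop (i + 1) := by
      rw [← hdrop] at hmem
      rcases List.mem_cons.mp hmem with h' | h'
      · exact absurd h'.symm hge
      · assumption
    obtain ⟨h1, h2, h3⟩ := ih hmem'
    refine ⟨h1, h2, ?_⟩
    intro j hij hjk
    rcases Nat.eq_or_lt_of_le hij with rfl | hlt
    · exact hne
    · exact h3 j hlt hjk
  | case2 i h hne =>
    intro _
    rw [not_not] at hne
    exact ⟨h, hne, fun j h1 h2 => absurd (lt_of_le_of_lt h1 h2) (lt_irrefl i)⟩
  | case3 i h =>
    intro hmem
    rw [List.drop_eq_nil_of_le (by omega)] at hmem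
    simp at hmem

theorem countP_set_some_lt (t : List (Option Int)) (k : Nat) (v : Int)
    (hk : k < t.length) (hnone : t.getD k none = none) :
    (t.set k (some v)).countP (fun x => x.isNone) < t.countP (fun x => x.isNone) := by
  have hknone : t[k] = none := by rwa [List.getD_eq_getElem _ _ hk] at hnone
  have ht : t = t.take k ++ t[k] :: t.drop (k + 1) := by
    rw [List.getElem_cons_drop hk, List.take_append_drop]
  rw [List.set_eq_take_cons_drop _ hk]
  conv_rhs => rw [ht, hknone]
  simp [List.countP_append]

theorem none_mem_of_count_ne (t : List (Option Int)) (h : ¬ pyNonecount t = 0) : none ∈ t := by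
  have hne : t.countP (fun x => x.isNone) ≠ 0 := by
    intro hz
    exact h (by rw [pyNonecount_eq_countP, hz]; rfl)
  obtain ⟨x, hxmem, hxp⟩ := List.countP_pos_iff.mp (Nat.pos_of_ne_zero hne)
  cases x with
  | none => exact hxmem
  | some y => simp at hxp

theorem gen_decr (t : List (Option Int)) (v : Int) (h : ¬ pyNonecount t = 0) :
    (t.set (pyFirstNone t 0) (some v)).countP (fun x => x.isNone)
      < t.countP (fun x => x.isNone) := by
  obtain ⟨h1, h2, _⟩ := pyFirstNone_spec t 0 (by simpa using none_mem_of_count_ne t h)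
  exact countP_set_some_lt t _ v h1 h2

-- generate_minterm(term); in the base case nonecount is 0, so every entry is 'some v'
-- and the returned Python list of ints is term with the Option layer removed: (·.getD 0) is exact there
def generate_minterm (term : List (Option Int)) : List (List Int) :=
  if h : pyNonecount term = 0 then [term.map (fun x => x.getD 0)]
  else
    let i := pyFirstNone term 0
    generate_minterm (term.set i (some 0)) ++ generate_minterm (term.set i (some 1))
termination_by term.countP (fun x => x.isNone)
decreasing_by
  · exact gen_decr term 0 h
  · exact gen_decr term 1 h

-- for i in range(len(term)): if term[i]==0 or term[i]==1: … append((i, generate_minterm(newterm)))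
def next_possible_mintermsforexpansion (term : List (Option Int)) : List (Int × List (List Int)) :=
  (List.range term.length).foldl
    (fun acc i =>
      let v := term.getD i none
      if v = some 0 ∨ v = some 1 then
        -- newterm[i] = int(not newterm[i]): 0 ↦ 1, 1 ↦ 0
        acc ++ [((i : Int), generate_minterm (term.set i (if v = some 0 then some 1 else some 0)))]
      else acc)
    []

-- ===== PORT B =====

-- _expansions: iterate over reversed(term) maintaining the suffix list (foldr = that loop)
def bExpand (term : List (Option Int)) : List (List Int) :=
  term.foldr
    (fun v suffixes =>
      match v with
      | none => suffixes.map (fun s => 0 :: s) ++ suffixes.map (fun s => 1 :: s)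
      | some x => suffixes.map (fun s => x :: s))
    [[]]

-- the per-element work of B's comprehension: keep (i, _expansions(term[:i] + [1 - v] + term[i+1:])) iff v == 0 or v == 1
def bBody (term : List (Option Int)) (p : Int × Option Int) : Option (Int × List (List Int)) :=
  match p.2 with
  | some x =>
      if x = 0 ∨ x = 1 then
        some (p.1, bExpand (term.take p.1.toNat ++ [some (1 - x)] ++ term.drop (p.1.toNat + 1)))
      else none
  | none => none

-- [(i, _expansions(term[:i] + [1 - v] + term[i+1:])) for i, v in enumerate(term) if v == 0 or v == 1]
def next_possible_mintermsforexpansion_alt (term : List (Option Int)) : List (Int × List (List Int)) :=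
  (PySem.List.enumerate term).filterMap (bBody term)

-- ===== PRECONDITION & SPEC =====
def Spec_next_possible_mintermsforexpansion (term : List (Option Int)) (out : List (Int × List (List Int))) : Prop := out = next_possible_mintermsforexpansion_alt term
instance (term : List (Option Int)) (out : List (Int × List (List Int))) : Decidable (Spec_next_possible_mintermsforexpansion term out) := by unfold Spec_next_possible_mintermsforexpansion; infer_instance

-- ===== CLAIM (what is proved, stated in full; the proofs are below) =====
def Claim_equal_next_possible_mintermsforexpansion : Prop := ∀ (term : List (Option Int)), Dom_next_possible_mintermsforexpansion term → Spec_next_possible_mintermsforexpansion term (next_possible_mintermsforexpansion term)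

-- ===== LEMMAS AND PROOFS =====

theorem bExpand_some (x : Int) (t : List (Option Int)) :
    bExpand (some x :: t) = (bExpand t).map (fun s => x :: s) := rfl

theorem bExpand_none (t : List (Option Int)) :
    bExpand (none :: t) = (bExpand t).map (fun s => 0 :: s) ++ (bExpand t).map (fun s => 1 :: s) := rfl

theorem bExpand_no_none (t : List (Option Int)) (h : ∀ x ∈ t, x ≠ none) :
    bExpand t = [t.map (fun x => x.getD 0)] := by
  induction t with
  | nil => rfl
  | cons a t ih =>
    cases a with
    | none => exact absurd rfl (h none (by simp))
    | some x =>
      rw [bExpand_some, ih (fun y hy => h y (by simp [hy]))]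
      simp

theorem bExpand_append_somes (pre : List (Option Int)) (h : ∀ x ∈ pre, x ≠ none)
    (rest : List (Option Int)) :
    bExpand (pre ++ rest) = (bExpand rest).map (fun s => pre.map (fun x => x.getD 0) ++ s) := by
  induction pre with
  | nil => simp
  | cons a pre ih =>
    cases a with
    | none => exact absurd rfl (h none (by simp))
    | some x =>
      rw [List.cons_append, bExpand_some, ih (fun y hy => h y (by simp [hy]))]
      simp [List.map_map, Function.comp]

theorem bExpand_split (t : List (Option Int)) (k : Nat) (hk : k < t.length)
    (hnone : t.getD k none = none) (hpre : ∀ j, j < k → t.getD j none ≠ none) :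
    bExpand t = bExpand (t.set k (some 0)) ++ bExpand (t.set k (some 1)) := by
  have hknone : t[k] = none := by rwa [List.getD_eq_getElem _ _ hk] at hnone
  have ht : t = t.take k ++ none :: t.drop (k + 1) := by
    rw [← hknone, List.getElem_cons_drop hk, List.take_append_drop]
  have hpre' : ∀ x ∈ t.take k, x ≠ none := by
    intro x hx
    obtain ⟨j, hj, hjx⟩ := List.mem_take_iff_getElem.mp hx
    have hjk : j < k := lt_of_lt_of_le hj (min_le_left _ _)
    have := hpre j hjk
    rwa [List.getD_eq_getElem _ _ (by omega), hjx] at this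
  rw [List.set_eq_take_cons_drop _ hk, List.set_eq_take_cons_drop _ hk]
  conv_lhs => rw [ht]
  rw [bExpand_append_somes _ hpre', bExpand_append_somes _ hpre', bExpand_append_somes _ hpre',
    bExpand_none, bExpand_some, bExpand_some, List.map_append]

theorem gen_eq_bExpand (t : List (Option Int)) : generate_minterm t = bExpand t := by
  suffices H : ∀ (n : Nat) (t : List (Option Int)), t.countP (fun x => x.isNone) = n →
      generate_minterm t = bExpand t from H _ t rfl
  intro n
  induction n using Nat.strong_induction_on with
  | _ n ih =>
    intro t htn
    rw [generate_minterm]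
    split_ifs with h
    · have h0 : t.countP (fun x => x.isNone) = 0 := by
        have := pyNonecount_eq_countP t
        rw [h] at this
        exact_mod_cast this.symm
      have hnn : ∀ x ∈ t, x ≠ none := by
        intro x hx hxn
        subst hxn
        have := List.countP_eq_zero.mp h0 none hx
        simp at this
      rw [bExpand_no_none t hnn]
    · obtain ⟨h1, h2, h3⟩ := pyFirstNone_spec t 0 (by simpa using none_mem_of_count_ne t h)
      have e0 := ih _ (htn ▸ countP_set_some_lt t (pyFirstNone t 0) 0 h1 h2) _ rfl
      have e1 := ih _ (htn ▸ countP_set_some_lt t (pyFirstNone t 0) 1 h1 h2) _ rfl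
      simp only []
      rw [e0, e1, ← bExpand_split t (pyFirstNone t 0) h1 h2 (fun j hj => h3 j (Nat.zero_le j) hj)]

theorem foldl_ite_filterMap {β : Type} (g : Nat → β) (p : Nat → Prop) [DecidablePred p] :
    ∀ (l : List Nat) (acc : List β),
      l.foldl (fun acc i => if p i then acc ++ [g i] else acc) acc
        = acc ++ l.filterMap (fun i => if p i then some (g i) else none) := by
  intro l
  induction l with
  | nil => simp
  | cons a l ih =>
    intro acc
    by_cases hp : p a <;> simp [hp, ih]

theorem enumerate_eq_range_map (xs : List (Option Int)) :
    ∀ (s : Nat), PySem.List.enumerate xs (s : Int)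
      = (List.range xs.length).map (fun (i : Nat) => (((s + i : Nat) : Int), xs.getD i none)) := by
  induction xs with
  | nil => intro s; simp [PySem.List.enumerate_nil]
  | cons a xs ih =>
    intro s
    rw [PySem.List.enumerate_cons]
    have : ((s : Int) + 1) = ((s + 1 : Nat) : Int) := by push_cast; ring
    rw [this, ih (s + 1)]
    simp only [List.length_cons, List.range_succ_eq_map, List.map_cons, List.map_map]
    congr 1
    apply List.map_congr_left
    intro i _
    simp [Function.comp, List.getD_cons_succ]
    omega

theorem bBody_none_arg (term : List (Option Int)) (i : Nat) :
    bBody term ((i : Int), none) = none := rfl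

theorem bBody_some_arg (term : List (Option Int)) (i : Nat) (x : Int) :
    bBody term ((i : Int), some x)
      = if x = 0 ∨ x = 1 then
          some ((i : Int), bExpand (term.take i ++ [some (1 - x)] ++ term.drop (i + 1)))
        else none := by
  simp [bBody]

theorem enumerate_zero_eq (term : List (Option Int)) :
    PySem.List.enumerate term 0
      = (List.range term.length).map (fun (i : Nat) => ((i : Int), term.getD i none)) := by
  have := enumerate_eq_range_map term 0
  simpa using this

theorem next_possible_mintermsforexpansion_eq (term : List (Option Int)) :
    next_possible_mintermsforexpansion term = next_possible_mintermsforexpansion_alt term := by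
  rw [next_possible_mintermsforexpansion, next_possible_mintermsforexpansion_alt]
  have hA := foldl_ite_filterMap
    (fun i => ((i : Int), generate_minterm (term.set i
      (if term.getD i none = some 0 then some 1 else some 0))))
    (fun i => term.getD i none = some 0 ∨ term.getD i none = some 1)
    (List.range term.length) []
  simp only [List.nil_append] at hA
  rw [hA, enumerate_zero_eq term, List.filterMap_map]
  apply List.filterMap_congr
  intro i hi
  simp only [List.mem_range] at hi
  simp only [Function.comp_apply]
  cases hv : term.getD i none with
  | none => simp [hv, bBody_none_arg]
  | some x =>
    rw [bBody_some_arg]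
    by_cases hx : x = 0 ∨ x = 1
    · have hcond : term.getD i none = some 0 ∨ term.getD i none = some 1 := by
        rcases hx with rfl | rfl
        · exact Or.inl hv
        · exact Or.inr hv
      rw [hv] at hcond
      rw [if_pos hcond, if_pos hx]
      have hset : term.set i (if (some x : Option Int) = some 0 then some 1 else some 0)
          = term.take i ++ [some (1 - x)] ++ term.drop (i + 1) := by
        rw [List.set_eq_take_cons_drop _ hi]
        rcases hx with rfl | rfl
        · norm_num
        · norm_num
      rw [hset, gen_eq_bExpand]
    · have hcond : ¬ ((some x : Option Int) = some 0 ∨ some x = some 1) := by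
        intro hc
        rcases hc with hc | hc
        · exact hx (Or.inl (by injection hc))
        · exact hx (Or.inr (by injection hc))
      rw [if_neg hcond, if_neg hx]

-- ===== VERDICT (by name: the statement is the Claim_ definition above) =====
theorem next_possible_mintermsforexpansion_spec : Claim_equal_next_possible_mintermsforexpansion := by
  intro term _
  unfold Spec_next_possible_mintermsforexpansion
  exact next_possible_mintermsforexpansion_eq term
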